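-- pv_equiv track=rewrite | github.com/MrBrantCode/unitest_baseline | mut_generate/mist_train_cf/cf_8245/solution.py | find_anagram_pairs
-- ===== SOURCE A (Python) =====
-- def find_anagram_pairs(words):
--     anagram_pairs = []
--     n = len(words)
--
--     for i in range(n):
--         count1 = [0] * 26
--         word1 = words[i]
--
--         for char in word1:
--             count1[ord(char) - ord('a')] += 1
--
--         for j in range(i + 1, n):
--             count2 = [0] * 26
--             word2 = words[j]
--
--             for char in word2:
--                 count2[ord(char) - ord('a')] += 1
--
--             if count1 == count2:
--                 anagram_pairs.append((word1, word2))
--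
--     return anagram_pairs
-- ===== SOURCE B (Python) =====
-- def find_anagram_pairs(words):
--     def signature(w):
--         c = [0] * 26
--         for ch in w:
--             c[ord(ch) - ord('a')] += 1
--         return tuple(c)
--
--     sigs = [signature(w) for w in words]
--     groups = {}
--     for i, s in enumerate(sigs):
--         groups.setdefault(s, []).append(i)
--     pairs = []
--     seen = {}
--     for i, s in enumerate(sigs):
--         k = seen.get(s, 0)
--         for j in groups[s][k + 1:]:
--             pairs.append((words[i], words[j]))
--         seen[s] = k + 1
--     return pairs
-- ===== Notes on version B (the rewrite author's own statement) =====
-- stated objective: faster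
-- what changed: B computes each word's 26-count signature once and groups indices by signature in a dict, emitting for each i only its later group partners, instead of A's nested index loops that recompute the inner word's count on every (i,j) comparison.
import Mathlib
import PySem

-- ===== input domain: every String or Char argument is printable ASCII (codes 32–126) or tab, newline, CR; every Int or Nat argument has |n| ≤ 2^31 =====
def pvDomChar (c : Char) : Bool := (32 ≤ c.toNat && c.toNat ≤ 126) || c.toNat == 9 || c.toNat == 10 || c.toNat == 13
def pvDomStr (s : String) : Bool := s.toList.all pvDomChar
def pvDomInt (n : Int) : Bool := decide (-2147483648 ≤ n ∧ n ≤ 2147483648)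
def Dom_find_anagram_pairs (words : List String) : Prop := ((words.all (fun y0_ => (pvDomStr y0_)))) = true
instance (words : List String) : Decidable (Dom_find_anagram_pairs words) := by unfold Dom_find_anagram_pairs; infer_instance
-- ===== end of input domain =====

-- B replaces A's nested loops (which recompute the inner word's letter count on every
-- comparison) with one signature pass plus a dict grouping indices by signature; the
-- timing run measured B faster on the larger generated inputs.


-- ===== PORT A =====
-- A's letter-count loop 'count[ord(ch)-97] += 1' (appears twice inline in A).
-- pySetD/pyGetD give Python's negative-index semantics; Pre_ keeps every index in [-26, 25],
-- where Python does not raise.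
def pvCountA (w : List Char) : List Int :=
  w.foldl (fun c ch =>
    PySem.List.pySetD c ((ch.toNat : Int) - 97)
      (PySem.List.pyGetD c ((ch.toNat : Int) - 97) 0 + 1)) (List.replicate 26 0)

def find_anagram_pairs (words : List String) : List (String × String) :=
  let n : Int := words.length
  (PySem.List.pyRange 0 n 1).foldl (fun acc i =>
    let word1 := PySem.List.pyGetD words i ""
    let count1 := pvCountA word1.toList
    (PySem.List.pyRange (i + 1) n 1).foldl (fun acc j =>
      let word2 := PySem.List.pyGetD words j ""
      let count2 := pvCountA word2.toList
      if count1 = count2 then acc ++ [(word1, word2)] else acc) acc) []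

-- ===== PORT B =====
-- B's helper 'signature(w)': same counting loop, result used as a dict key.
def pvSigB (w : String) : List Int :=
  w.toList.foldl (fun c ch =>
    PySem.List.pySetD c ((ch.toNat : Int) - 97)
      (PySem.List.pyGetD c ((ch.toNat : Int) - 97) 0 + 1)) (List.replicate 26 0)

def find_anagram_pairs_alt (words : List String) : List (String × String) :=
  let sigs := words.map pvSigB
  -- groups.setdefault(s, []).append(i)
  let groups : PySem.Dict (List Int) (List Int) :=
    (PySem.List.enumerate sigs 0).foldl
      (fun d p => d.modify p.2 [] (fun g => g ++ [p.1])) PySem.Dict.empty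
  ((PySem.List.enumerate sigs 0).foldl
    (fun st p =>
      let k := st.2.getD p.2 0
      let g := groups.getD p.2 []
      (st.1 ++ (PySem.List.slice g (some (k + 1)) none).map
          (fun j => (PySem.List.pyGetD words p.1 "", PySem.List.pyGetD words j "")),
       st.2.insert p.2 (k + 1)))
    (([] : List (String × String)), (PySem.Dict.empty : PySem.Dict (List Int) Int))).1

-- ===== PRECONDITION & SPEC =====
-- Pre_ excludes exactly the inputs on which Python A raises IndexError: a character whose
-- code is outside [71, 122] makes 'ord(ch) - 97' fall outside the valid index range [-26, 25]
-- of the 26-slot count list.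
def Pre_find_anagram_pairs (words : List String) : Prop :=
  (words.all (fun w => w.toList.all (fun c => 71 ≤ c.toNat && c.toNat ≤ 122))) = true
instance (words : List String) : Decidable (Pre_find_anagram_pairs words) := by
  unfold Pre_find_anagram_pairs; infer_instance
def pvWitness_find_anagram_pairs : List String :=
  ["listen", "silent", "enlist", "google", "banana"]
def Spec_find_anagram_pairs (words : List String) (out : List (String × String)) : Prop :=
  out = find_anagram_pairs_alt words
instance (words : List String) (out : List (String × String)) :
    Decidable (Spec_find_anagram_pairs words out) := by
  unfold Spec_find_anagram_pairs; infer_instance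

-- ===== CLAIM (what is proved, stated in full; the proofs are below) =====
def Claim_equal_find_anagram_pairs : Prop :=
  ∀ (words : List String), Dom_find_anagram_pairs words →
    Pre_find_anagram_pairs words →
      Spec_find_anagram_pairs words (find_anagram_pairs words)

-- ===== LEMMAS AND PROOFS =====

-- Abbreviations for the proof (words[i], sigs[j], the index list of a signature,
-- the running count of a signature, and the target pair list up to outer index m).
def pvWd (words : List String) (i : Int) : String := PySem.List.pyGetD words i ""
def pvSg (sigs : List (List Int)) (j : Int) : List Int := PySem.List.pyGetD sigs j []
def pvLs (sigs : List (List Int)) (s : List Int) : List Int :=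
  (PySem.List.pyRange 0 (sigs.length : Int) 1).filter (fun j => pvSg sigs j == s)
def pvCnt (sigs : List (List Int)) (s : List Int) (m : Int) : Nat :=
  ((PySem.List.pyRange 0 m 1).filter (fun j => pvSg sigs j == s)).length
def pvOut (words : List String) (sigs : List (List Int)) (m : Int) : List (String × String) :=
  (PySem.List.pyRange 0 m 1).flatMap (fun i =>
    ((PySem.List.pyRange (i + 1) (sigs.length : Int) 1).filter
        (fun j => pvSg sigs j == pvSg sigs i)).map
      (fun j => (pvWd words i, pvWd words j)))

theorem pv_flatMap_congr {α β : Type} {l : List α} {f g : α → List β}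
    (h : ∀ a ∈ l, f a = g a) : l.flatMap f = l.flatMap g := by
  induction l with
  | nil => rfl
  | cons x t ih =>
    simp only [List.flatMap_cons, h x (List.mem_cons_self), ih (fun a ha => h a (List.mem_cons_of_mem _ ha))]

-- the grouping loop: getD after folding 'd.modify p.2 [] (· ++ [p.1])'
theorem pv_groups_fold (l : List (Int × List Int)) (d : PySem.Dict (List Int) (List Int))
    (s : List Int) :
    (l.foldl (fun d p => d.modify p.2 [] (fun g => g ++ [p.1])) d).getD s []
      = d.getD s [] ++ (l.filter (fun p => p.2 == s)).map (·.1) := by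
  induction l generalizing d with
  | nil => simp
  | cons p t ih =>
    simp only [List.foldl_cons, ih, List.filter_cons]
    by_cases h : p.2 = s
    · subst h
      simp [PySem.Dict.getD_modify_self]
    · have h' : s ≠ p.2 := fun hh => h hh.symm
      simp [PySem.Dict.getD_modify_of_ne d _ _ h', h]

-- the groups dict of B: each signature maps to its (increasing) index list
theorem pv_groups_getD (sigs : List (List Int)) (s : List Int) :
    ((PySem.List.enumerate sigs 0).foldl
        (fun d p => d.modify p.2 [] (fun g => g ++ [p.1])) PySem.Dict.empty).getD s []
      = pvLs sigs s := by
  rw [PySem.List.enumerate_eq_map_pyRange sigs ([] : List Int), pv_groups_fold]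
  simp [List.filter_map, pvLs, pvSg, Function.comp_def]

-- the tail of a signature's index list past the current index
theorem pv_slice_tail (sigs : List (List Int)) (m : Int) (h0 : 0 ≤ m)
    (h1 : m < (sigs.length : Int)) :
    PySem.List.slice (pvLs sigs (pvSg sigs m)) (some ((pvCnt sigs (pvSg sigs m) m : Int) + 1)) none
      = (PySem.List.pyRange (m + 1) (sigs.length : Int) 1).filter
          (fun j => pvSg sigs j == pvSg sigs m) := by
  have hsplit : PySem.List.pyRange 0 (sigs.length : Int) 1
      = (PySem.List.pyRange 0 m 1 ++ [m]) ++ PySem.List.pyRange (m + 1) (sigs.length : Int) 1 := by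
    rw [PySem.List.pyRange_one_append 0 (m + 1) (sigs.length : Int) (by omega) (by omega),
      PySem.List.pyRange_one_succ_right h0]
  have hlen : ((PySem.List.pyRange 0 m 1 ++ [m]).filter
      (fun j => pvSg sigs j == pvSg sigs m)).length = pvCnt sigs (pvSg sigs m) m + 1 := by
    simp [List.filter_append, pvCnt]
  rw [pvLs, hsplit, List.filter_append,
    PySem.List.slice_from _ (by positivity)]
  have htn : ((pvCnt sigs (pvSg sigs m) m : Int) + 1).toNat
      = ((PySem.List.pyRange 0 m 1 ++ [m]).filter (fun j => pvSg sigs j == pvSg sigs m)).length := by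
    rw [hlen]; omega
  rw [htn, List.drop_left]

-- the invariant of B's emission loop
theorem pv_fold_inv (words : List String) (sigs : List (List Int)) (m : Nat)
    (hm : m ≤ sigs.length) :
    ∃ seen : PySem.Dict (List Int) Int,
      (PySem.List.pyRange 0 (m : Int) 1).foldl
        (fun st j =>
          (st.1 ++ (PySem.List.slice (pvLs sigs (pvSg sigs j))
              (some (st.2.getD (pvSg sigs j) 0 + 1)) none).map
              (fun j' => (pvWd words j, pvWd words j')),
           st.2.insert (pvSg sigs j) (st.2.getD (pvSg sigs j) 0 + 1)))
        (([] : List (String × String)), (PySem.Dict.empty : PySem.Dict (List Int) Int))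
      = (pvOut words sigs (m : Int), seen)
      ∧ ∀ s, seen.getD s 0 = (pvCnt sigs s (m : Int) : Int) := by
  induction m with
  | zero =>
    refine ⟨PySem.Dict.empty, ?_, ?_⟩
    · simp [PySem.List.pyRange_one_eq_nil (by omega : (0:Int) ≤ 0), pvOut]
    · intro s
      simp [pvCnt, PySem.List.pyRange_one_eq_nil (by omega : (0:Int) ≤ 0)]
  | succ k ih =>
    obtain ⟨seen, hfold, hcnt⟩ := ih (by omega)
    have hk0 : (0 : Int) ≤ (k : Int) := by positivity
    have hkN : (k : Int) < (sigs.length : Int) := by exact_mod_cast hm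
    have hrange : PySem.List.pyRange 0 ((k + 1 : Nat) : Int) 1
        = PySem.List.pyRange 0 (k : Int) 1 ++ [(k : Int)] := by
      push_cast
      exact PySem.List.pyRange_one_succ_right hk0
    refine ⟨seen.insert (pvSg sigs (k : Int)) (seen.getD (pvSg sigs (k : Int)) 0 + 1), ?_, ?_⟩
    · rw [hrange, List.foldl_append, hfold]
      simp only [List.foldl_cons, List.foldl_nil]
      congr 1
      rw [hcnt, pv_slice_tail sigs (k : Int) hk0 hkN]
      have : pvOut words sigs ((k + 1 : Nat) : Int)
          = pvOut words sigs (k : Int)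
            ++ ((PySem.List.pyRange ((k : Int) + 1) (sigs.length : Int) 1).filter
                (fun j => pvSg sigs j == pvSg sigs (k : Int))).map
              (fun j => (pvWd words (k : Int), pvWd words j)) := by
        rw [pvOut, hrange, List.flatMap_append]
        simp [pvOut]
      rw [this]
    · intro s
      by_cases hs : s = pvSg sigs (k : Int)
      · rw [hs, PySem.Dict.getD_insert_self, hcnt]
        have : pvCnt sigs (pvSg sigs (k : Int)) ((k + 1 : Nat) : Int)
            = pvCnt sigs (pvSg sigs (k : Int)) (k : Int) + 1 := by
          rw [pvCnt, hrange, List.filter_append]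
          simp [pvCnt]
        rw [this]; push_cast; ring
      · rw [PySem.Dict.getD_insert_of_ne _ _ _ hs, hcnt]
        have hs2 : ¬ pvSg sigs (k : Int) = s := fun hh => hs hh.symm
        have : pvCnt sigs s ((k + 1 : Nat) : Int) = pvCnt sigs s (k : Int) := by
          rw [pvCnt, hrange, List.filter_append]
          simp [pvCnt, hs2]
        rw [this]

-- B computes pvOut
theorem pv_B_eq (words : List String) :
    find_anagram_pairs_alt words = pvOut words (words.map pvSigB) (words.length : Int) := by
  simp only [find_anagram_pairs_alt]
  simp only [pv_groups_getD]
  rw [PySem.List.enumerate_eq_map_pyRange (words.map pvSigB) ([] : List Int)]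
  simp only [List.foldl_map, PySem.List.len_eq, List.length_map]
  obtain ⟨seen, hf, -⟩ := pv_fold_inv words (words.map pvSigB) (words.map pvSigB).length le_rfl
  simp only [pvWd, pvSg, List.length_map] at hf
  rw [hf]

theorem pv_decide_beq (a b : List Int) : (decide (a = b)) = (b == a) := by
  by_cases h : a = b
  · subst h; simp
  · simp [h, Ne.symm h]

theorem pv_sg_eq (words : List String) (i : Int) (h0 : 0 ≤ i)
    (h1 : i < (words.length : Int)) :
    pvSg (words.map pvSigB) i = pvCountA (PySem.List.pyGetD words i "").toList := by
  rw [pvSg, PySem.List.pyGetD_eq_getElem _ _ h0 (by simpa using h1),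
    List.getElem_map, PySem.List.pyGetD_eq_getElem _ _ h0 h1]
  rfl

-- A computes pvOut
theorem pv_A_eq (words : List String) :
    find_anagram_pairs words = pvOut words (words.map pvSigB) (words.length : Int) := by
  simp only [find_anagram_pairs]
  simp only [PySem.List.foldl_append_ite]
  simp only [PySem.List.foldl_append_eq_flatMap]
  simp only [List.nil_append]
  simp only [pvOut, pvWd, List.length_map]
  refine pv_flatMap_congr ?_
  intro i hi
  rw [PySem.List.mem_pyRange_one] at hi
  have hfc : ∀ j ∈ PySem.List.pyRange (i + 1) ((words.length : Int)) 1,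
      (decide (pvCountA (PySem.List.pyGetD words i "").toList
          = pvCountA (PySem.List.pyGetD words j "").toList))
        = (pvSg (words.map pvSigB) j == pvSg (words.map pvSigB) i) := by
    intro j hj
    rw [PySem.List.mem_pyRange_one] at hj
    rw [pv_sg_eq words i hi.1 hi.2, pv_sg_eq words j (by omega) hj.2]
    exact pv_decide_beq _ _
  rw [List.filter_congr hfc]

-- ===== VERDICT (by name: the statement is the Claim_ definition above) =====
theorem find_anagram_pairs_spec : Claim_equal_find_anagram_pairs := by
  intro words _ _
  unfold Spec_find_anagram_pairs
  rw [pv_A_eq, pv_B_eq]
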